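-- pv_equiv track=rewrite | github.com/Informasjonsforvaltning/dataset-catalog-etl | files/transform_datasets.py | fix_url_list
-- ===== SOURCE A (Python) =====
-- def fix_url(url):
--     new_url = 'https' + url[4:]
--     return new_url
--
-- def check_string(string):
--     if string and len(string) > 13 and string[:13] == 'http://hotell':
--         return True
--     return False
--
-- def fix_url_list(url_list):
--     new_list = []
--     changed = False
--     for url in url_list:
--         if check_string(url):
--             new_list.append(fix_url(url))
--             changed = True
--         else:
--             new_list.append(url)
--     return new_list if changed else None
-- ===== SOURCE B (Python) =====
-- def fix_url(url):
--     new_url = 'https' + url[4:]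
--     return new_url
--
-- def check_string(string):
--     if string and len(string) > 13 and string[:13] == 'http://hotell':
--         return True
--     return False
--
-- def fix_url_list(url_list):
--     items = list(url_list)
--     if not any(check_string(u) for u in items):
--         return None
--     return [fix_url(u) if check_string(u) else u for u in items]
-- ===== Notes on version B (the rewrite author's own statement) =====
-- stated objective: simpler
-- what changed: Replaces the single loop threading an accumulator list plus a 'changed' boolean with an any() pass that decides None up front, followed by a plain map comprehension producing the rewritten list.
import Mathlib
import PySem

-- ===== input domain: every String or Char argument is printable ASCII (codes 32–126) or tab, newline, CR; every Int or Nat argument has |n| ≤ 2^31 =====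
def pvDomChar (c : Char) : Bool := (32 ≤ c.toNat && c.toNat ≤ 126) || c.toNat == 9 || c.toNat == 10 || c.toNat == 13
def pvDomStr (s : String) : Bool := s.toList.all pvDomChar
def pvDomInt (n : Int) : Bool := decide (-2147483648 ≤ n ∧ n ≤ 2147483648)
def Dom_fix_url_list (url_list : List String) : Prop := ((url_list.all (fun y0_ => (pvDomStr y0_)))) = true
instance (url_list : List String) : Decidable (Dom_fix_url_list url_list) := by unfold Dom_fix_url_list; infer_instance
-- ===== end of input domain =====

-- B replaces the loop's accumulator-plus-changed-flag with an any() pass then a map; equal results.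
-- ===== PORT A =====
def fix_url (url : String) : String :=
  String.ofList ("https".toList ++ (PySem.Str.slice url (some 4) none).toList)

def check_string (s : String) : Bool :=
  if s ≠ "" ∧ PySem.Str.len s > 13 ∧ PySem.Str.slice s none (some 13) = "http://hotell" then true
  else false

def fix_url_list (url_list : List String) : Option (List String) :=
  let r := url_list.foldl
    (fun (st : List String × Bool) url =>
      if check_string url then (st.1 ++ [fix_url url], true)
      else (st.1 ++ [url], st.2))
    ([], false)
  if r.2 then some r.1 else none

-- ===== PORT B =====
def fix_url_list_alt (url_list : List String) : Option (List String) :=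
  if url_list.any (fun u => check_string u) then
    some (url_list.map (fun u => if check_string u then fix_url u else u))
  else
    none

-- ===== PRECONDITION & SPEC =====
def Spec_fix_url_list (url_list : List String) (out : Option (List String)) : Prop := out = fix_url_list_alt url_list
instance (url_list : List String) (out : Option (List String)) : Decidable (Spec_fix_url_list url_list out) := by unfold Spec_fix_url_list; infer_instance

-- ===== CLAIM (what is proved, stated in full; the proofs are below) =====
def Claim_equal_fix_url_list : Prop := ∀ (url_list : List String), Dom_fix_url_list url_list → Spec_fix_url_list url_list (fix_url_list url_list)

-- ===== LEMMAS AND PROOFS =====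
theorem fix_url_list_foldl (l : List String) (acc : List String) (ch : Bool) :
    l.foldl
      (fun (st : List String × Bool) url =>
        if check_string url then (st.1 ++ [fix_url url], true)
        else (st.1 ++ [url], st.2))
      (acc, ch)
    = (acc ++ l.map (fun u => if check_string u then fix_url u else u),
       ch || l.any (fun u => check_string u)) := by
  induction l generalizing acc ch with
  | nil => simp
  | cons x xs ih =>
    by_cases hx : check_string x <;>
      simp [List.foldl, hx, ih]

-- ===== VERDICT (by name: the statement is the Claim_ definition above) =====
theorem fix_url_list_spec : Claim_equal_fix_url_list := by
  intro url_list _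
  unfold Spec_fix_url_list fix_url_list fix_url_list_alt
  rw [fix_url_list_foldl]
  by_cases h : url_list.any (fun u => check_string u) <;> simp [h]
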